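-- pv_equiv track=rewrite | github.com/buitanphat247/DSA-CPY | Sum(Sum(n))/main.py | divString
-- ===== SOURCE A (Python) =====
-- def divString(s, d):
--     res = ""
--     cur = 0
--     for i in range(len(s)):
--         cur = cur * 10 + int(s[i])
--         res += str(cur // d)
--         cur %= d
--     return res
-- ===== SOURCE B (Python) =====
-- def divString(s, d):
--     # Two separate passes: first accumulate the running remainders, then
--     # emit each quotient digit from (remainder-before, digit).
--     rems = [0]
--     r = 0
--     for ch in s:
--         r = (r * 10 + int(ch)) % d
--         rems.append(r)
--     return "".join(str((r * 10 + int(ch)) // d) for r, ch in zip(rems, s))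
-- ===== Notes on version B (the rewrite author's own statement) =====
-- stated objective: alternative
-- what changed: A's single interleaved loop mutating (res, cur) is replaced by two separately shaped passes: a scan that accumulates the running remainders, then a zip/map/join that emits each quotient digit from (remainder-before, digit).
import Mathlib
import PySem

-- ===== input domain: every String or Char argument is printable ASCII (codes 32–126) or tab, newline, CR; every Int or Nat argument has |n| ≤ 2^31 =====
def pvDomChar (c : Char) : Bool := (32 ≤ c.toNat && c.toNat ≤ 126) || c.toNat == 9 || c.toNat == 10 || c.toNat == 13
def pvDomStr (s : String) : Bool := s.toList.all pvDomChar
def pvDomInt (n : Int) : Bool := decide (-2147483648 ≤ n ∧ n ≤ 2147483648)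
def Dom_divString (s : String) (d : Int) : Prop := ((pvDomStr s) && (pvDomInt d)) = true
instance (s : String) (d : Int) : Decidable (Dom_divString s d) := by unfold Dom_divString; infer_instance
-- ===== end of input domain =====

-- B replaces A's single interleaved loop by two passes (scan of running remainders,
-- then a map/join producing the quotient digits); objective: alternative decomposition, not speed.
-- Strings are handled as their character lists (exact: Python str concat/join = list append/flatten).

-- ===== PORT A =====
-- A: one loop, state (res, cur); per digit: cur = cur*10+int(c); res += str(cur//d); cur %= d.
def divString (s : String) (d : Int) : String :=
  String.ofList
    ((s.toList.foldl
        (fun (st : List Char × Int) c =>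
          let cur := st.2 * 10 + (PySem.Int.ofChars? [c]).getD 0
          (st.1 ++ PySem.Int.toChars (PySem.Int.floordiv cur d), PySem.Int.mod cur d))
        ([], 0)).1)

-- ===== PORT B =====
-- pass 1 of Source B: the list of running remainders (rems[i] = remainder before digit i)
def divString_altRems (s : String) (d : Int) : List Int :=
  s.toList.scanl (fun r c => PySem.Int.mod (r * 10 + (PySem.Int.ofChars? [c]).getD 0) d) 0

-- pass 2 of Source B: join the quotient digit strings computed from (remainder-before, digit)
def divString_alt (s : String) (d : Int) : String :=
  String.ofList
    (PySem.Chars.join []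
      (((divString_altRems s d).zip s.toList).map
        (fun p => PySem.Int.toChars
          (PySem.Int.floordiv (p.1 * 10 + (PySem.Int.ofChars? [p.2]).getD 0) d))))

-- ===== PRECONDITION & SPEC =====
-- Pre_ excludes exactly the inputs where the Python A raises: a non-digit character
-- (ValueError from int(s[i])) or d = 0 with s non-empty (ZeroDivisionError).
def Pre_divString (s : String) (d : Int) : Prop :=
  s = "" ∨ (d ≠ 0 ∧ s.toList.all PySem.Str.isdigit = true)
instance (s : String) (d : Int) : Decidable (Pre_divString s d) := by
  unfold Pre_divString; infer_instance

def pvWitness_divString : String × Int := ("1234", 7)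

def Spec_divString (s : String) (d : Int) (out : String) : Prop := out = divString_alt s d
instance (s : String) (d : Int) (out : String) : Decidable (Spec_divString s d out) := by
  unfold Spec_divString; infer_instance

-- ===== CLAIM (what is proved, stated in full; the proofs are below) =====
def Claim_equal_divString : Prop :=
  ∀ (s : String) (d : Int), Dom_divString s d → Pre_divString s d →
    Spec_divString s d (divString s d)

-- ===== LEMMAS AND PROOFS =====

lemma join_nil_cons (x : List Char) (xs : List (List Char)) :
    PySem.Chars.join [] (x :: xs) = x ++ PySem.Chars.join [] xs := by
  cases xs <;> simp [PySem.Chars.join, List.intercalate, List.intersperse]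

-- A's interleaved loop, started at any (acc, cur), equals B's scan-then-join on the rest.
lemma divString_loop_eq (d : Int) (l : List Char) (cur : Int) (acc : List Char) :
    (l.foldl
        (fun (st : List Char × Int) c =>
          let cur := st.2 * 10 + (PySem.Int.ofChars? [c]).getD 0
          (st.1 ++ PySem.Int.toChars (PySem.Int.floordiv cur d), PySem.Int.mod cur d))
        (acc, cur)).1
      = acc ++ PySem.Chars.join []
          (((l.scanl (fun r c => PySem.Int.mod (r * 10 + (PySem.Int.ofChars? [c]).getD 0) d) cur).zip l).map
            (fun p => PySem.Int.toChars
              (PySem.Int.floordiv (p.1 * 10 + (PySem.Int.ofChars? [p.2]).getD 0) d))) := by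
  induction l generalizing cur acc with
  | nil => simp [PySem.Chars.join, List.intercalate]
  | cons c t ih =>
      simp only [List.foldl_cons, List.scanl_cons, List.zip_cons_cons, List.map_cons,
        join_nil_cons]
      rw [ih]
      simp [List.append_assoc]

-- ===== VERDICT (by name: the statement is the Claim_ definition above) =====
theorem divString_spec : Claim_equal_divString := by
  intro s d _ _
  show divString s d = divString_alt s d
  unfold divString divString_alt divString_altRems
  rw [divString_loop_eq]
  simp
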